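-- pv_equiv track=rewrite | github.com/lHumaNl/EchoWarp | echowarp/models/audio_device.py | __parse_powershell_stdout
-- ===== SOURCE A (Python) =====
-- from typing import List, Optional, Mapping
--
-- def __parse_powershell_stdout(stdout: str) -> List[str]:
--     lines = stdout.split('\n')
--     device_names = []
--     collect_names = False
--
--     for line in lines:
--         if '----' in line:
--             collect_names = True
--             continue
--
--         if collect_names and line.strip():
--             device_names.append(line.strip())
--
--     return device_names
-- ===== SOURCE B (Python) =====
-- from typing import List
--
--
-- def __parse_powershell_stdout(stdout: str) -> List[str]:
--     lines = stdout.split('\n')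
--     start = next((i for i, l in enumerate(lines) if '----' in l), None)
--     if start is None:
--         return []
--     return [l.strip() for l in lines[start + 1:] if l.strip() and '----' not in l]
-- ===== Notes on version B (the rewrite author's own statement) =====
-- stated objective: idiomatic
-- what changed: Replaced the single flag-threading loop with two phases: first locate the separator line, then build the result by a comprehension over the suffix after it.
import Mathlib
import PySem

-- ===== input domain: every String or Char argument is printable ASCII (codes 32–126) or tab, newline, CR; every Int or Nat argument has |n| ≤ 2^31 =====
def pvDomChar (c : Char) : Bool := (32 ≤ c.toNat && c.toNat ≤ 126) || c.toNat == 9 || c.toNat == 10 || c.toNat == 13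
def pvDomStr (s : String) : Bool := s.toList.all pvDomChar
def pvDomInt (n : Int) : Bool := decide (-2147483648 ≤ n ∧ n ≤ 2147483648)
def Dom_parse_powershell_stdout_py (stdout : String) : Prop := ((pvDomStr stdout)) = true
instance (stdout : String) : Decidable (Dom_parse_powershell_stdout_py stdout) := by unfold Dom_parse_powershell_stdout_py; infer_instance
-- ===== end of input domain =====

-- B restructures A's single flag-threading loop into a boundary-finding phase plus a
-- comprehension over the suffix; same result, same cost (objective: idiomatic).

-- ===== PORT A =====
-- the for-loop over lines, threading the accumulator and the collect_names flag
def pvLoopA : List String → List String → Bool → List String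
  | [], acc, _ => acc
  | l :: ls, acc, flag =>
    if PySem.Str.isIn "----" l then pvLoopA ls acc true
    else if flag && !(PySem.Str.strip l == "") then pvLoopA ls (acc ++ [PySem.Str.strip l]) flag
    else pvLoopA ls acc flag

def parse_powershell_stdout_py (stdout : String) : List String :=
  pvLoopA ((PySem.Str.split? stdout "\n").getD []) [] false

-- ===== PORT B =====
-- 'next((i for i,l in enumerate(lines) if '----' in l), None)' followed by lines[start+1:]:
-- returns the suffix after the first separator line, or none
def pvAfterSep : List String → Option (List String)
  | [] => none
  | l :: ls => if PySem.Str.isIn "----" l then some ls else pvAfterSep ls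

def parse_powershell_stdout_py_alt (stdout : String) : List String :=
  match pvAfterSep ((PySem.Str.split? stdout "\n").getD []) with
  | none => []
  | some rest =>
      (rest.filter (fun l => !(PySem.Str.strip l == "") && !(PySem.Str.isIn "----" l))).map
        PySem.Str.strip

-- ===== PRECONDITION & SPEC =====
def Spec_parse_powershell_stdout_py (stdout : String) (out : List String) : Prop := out = parse_powershell_stdout_py_alt stdout
instance (stdout : String) (out : List String) : Decidable (Spec_parse_powershell_stdout_py stdout out) := by unfold Spec_parse_powershell_stdout_py; infer_instance

-- ===== CLAIM (what is proved, stated in full; the proofs are below) =====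
def Claim_equal_parse_powershell_stdout_py : Prop := ∀ (stdout : String), Dom_parse_powershell_stdout_py stdout → Spec_parse_powershell_stdout_py stdout (parse_powershell_stdout_py stdout)

-- ===== LEMMAS AND PROOFS =====

-- once the flag is set, A's loop is exactly B's collection phase
theorem pvLoopA_true (ls : List String) (acc : List String) :
    pvLoopA ls acc true =
      acc ++ (ls.filter (fun l => !(PySem.Str.strip l == "") && !(PySem.Str.isIn "----" l))).map
        PySem.Str.strip := by
  induction ls generalizing acc with
  | nil => simp [pvLoopA]
  | cons l ls ih =>
    by_cases h : PySem.Chars.isIn ['-', '-', '-', '-'] l.toList = true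
    · simp [pvLoopA, h, ih]
    · by_cases hs : PySem.Str.strip l = ""
      · simp [pvLoopA, h, hs, ih]
      · simp [pvLoopA, h, hs, ih]

-- before the flag is set, A's loop is B: find the separator, then collect
theorem pvLoopA_false (ls : List String) (acc : List String) :
    pvLoopA ls acc false =
      acc ++ (match pvAfterSep ls with
        | none => []
        | some rest =>
            (rest.filter (fun l => !(PySem.Str.strip l == "") && !(PySem.Str.isIn "----" l))).map
              PySem.Str.strip) := by
  induction ls generalizing acc with
  | nil => simp [pvLoopA, pvAfterSep]
  | cons l ls ih =>
    by_cases h : PySem.Chars.isIn ['-', '-', '-', '-'] l.toList = true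
    · simp [pvLoopA, pvAfterSep, h, pvLoopA_true]
    · simp [pvLoopA, pvAfterSep, h, ih]

-- ===== VERDICT (by name: the statement is the Claim_ definition above) =====
theorem parse_powershell_stdout_py_spec : Claim_equal_parse_powershell_stdout_py := by
  intro stdout _
  unfold Spec_parse_powershell_stdout_py parse_powershell_stdout_py parse_powershell_stdout_py_alt
  simp [pvLoopA_false]
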